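-- pv_equiv track=rewrite | github.com/nickglt22/Midi-Chord-Progression-Generator | midi_chord_progression_gen.py | create_chord
-- ===== SOURCE A (Python) =====
-- def create_chord(scale_notes, scale_notes_ext, mod_scale_type, chord_type):
--     chords = []
--     for i in range(len(scale_notes_ext)):
--         if scale_notes_ext[i] in mod_scale_type:
--             chord = [scale_notes[i]]
--             for j in chord_type:
--                 chord.append(scale_notes[(i+j)%12])
--             chords.append(chord)
--
--     chords_to_remove = []
--     for chord in chords:
--         for note in chord:
--             if note not in mod_scale_type:
--                 chords_to_remove.append(chord)
--                 break
--
--     for chord in chords_to_remove: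
--         chords.remove(chord)
--
--     if not chords:
--         pass
--     else:
--         return chords
-- ===== SOURCE B (Python) =====
-- def create_chord(scale_notes, scale_notes_ext, mod_scale_type, chord_type):
--     result = []
--     for i in range(len(scale_notes_ext)):
--         note = scale_notes_ext[i]
--         if note not in mod_scale_type:
--             continue
--         chord = [scale_notes[i]] + [scale_notes[(i + j) % 12] for j in chord_type]
--         if all(n in mod_scale_type for n in chord):
--             result.append(chord)
--     return result if result else None
-- ===== Notes on version B (the rewrite author's own statement) =====
-- stated objective: simpler
-- what changed: A's three phases (build all chords, mark out-of-scale chords in a second pass, then delete each marked chord by value with list.remove) are collapsed into a single pass that builds each chord and appends it only if all its notes are in scale, returning None when nothing survives.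
import Mathlib
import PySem

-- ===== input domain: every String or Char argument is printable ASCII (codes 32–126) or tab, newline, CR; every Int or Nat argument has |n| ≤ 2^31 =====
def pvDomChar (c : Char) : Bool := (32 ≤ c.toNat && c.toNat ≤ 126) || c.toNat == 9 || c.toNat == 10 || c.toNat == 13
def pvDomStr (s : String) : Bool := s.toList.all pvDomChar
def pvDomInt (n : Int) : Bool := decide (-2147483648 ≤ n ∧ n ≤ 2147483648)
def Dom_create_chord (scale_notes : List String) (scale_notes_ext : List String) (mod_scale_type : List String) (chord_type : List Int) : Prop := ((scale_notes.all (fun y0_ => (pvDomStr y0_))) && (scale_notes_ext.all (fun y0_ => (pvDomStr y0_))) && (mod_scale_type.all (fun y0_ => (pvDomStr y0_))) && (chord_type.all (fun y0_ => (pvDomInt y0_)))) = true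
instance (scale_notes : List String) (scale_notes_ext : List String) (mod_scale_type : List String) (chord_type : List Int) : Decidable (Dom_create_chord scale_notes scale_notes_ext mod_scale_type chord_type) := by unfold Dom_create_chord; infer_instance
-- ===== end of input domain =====

-- B collapses A's three phases (build, mark-for-removal, remove-by-value) into one pass
-- that filters each chord as it is built; objective: simpler, same return value.

-- ===== PORT A =====
-- Literal port of A. Indexing uses pyGetD with default "": Pre_create_chord guarantees every
-- index that is actually evaluated is in range, so the "" default is never reached inside Pre_.
-- The inner 'for note in chord: if note not in mod: append; break' marks the chord once iff
-- some note is out of scale: ported as List.any (exact for that append-once-then-break shape).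
-- Python's list.remove raises ValueError only when the value is absent; here every removed
-- chord was taken from chords itself, so '(remove? …).getD cs' is exact (the none branch is unreachable).
def create_chord (scale_notes : List String) (scale_notes_ext : List String) (mod_scale_type : List String) (chord_type : List Int) : Option (List (List String)) :=
  let chords := (List.range scale_notes_ext.length).foldl
    (fun chords i =>
      if mod_scale_type.contains (PySem.List.pyGetD scale_notes_ext (i : Int) "") then
        chords ++ [chord_type.foldl
          (fun chord j => chord ++ [PySem.List.pyGetD scale_notes (PySem.Int.mod ((i : Int) + j) 12) ""])
          [PySem.List.pyGetD scale_notes (i : Int) ""]]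
      else chords) []
  let chords_to_remove := chords.foldl
    (fun acc chord => if chord.any (fun note => !(mod_scale_type.contains note)) then acc ++ [chord] else acc) []
  let chords' := chords_to_remove.foldl (fun cs c => (PySem.List.remove? cs c).getD cs) chords
  if chords'.isEmpty then none else some chords'

-- ===== PORT B =====
-- Port of Source B: one pass, 'continue' on an out-of-scale root, cons + map comprehension for the
-- chord, inline all-in-scale test; same pyGetD-with-"" convention as the port of A (see above).
def create_chord_alt (scale_notes : List String) (scale_notes_ext : List String) (mod_scale_type : List String) (chord_type : List Int) : Option (List (List String)) :=
  let result := (List.range scale_notes_ext.length).foldl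
    (fun result i =>
      let note := PySem.List.pyGetD scale_notes_ext (i : Int) ""
      if !(mod_scale_type.contains note) then result
      else
        let chord := PySem.List.pyGetD scale_notes (i : Int) "" ::
          chord_type.map (fun j => PySem.List.pyGetD scale_notes (PySem.Int.mod ((i : Int) + j) 12) "")
        if chord.all (fun n => mod_scale_type.contains n) then result ++ [chord] else result) []
  if result.isEmpty then none else some result

-- ===== PRECONDITION & SPEC =====
-- Pre_ excludes exactly the inputs where Python A raises IndexError: an index i whose guard
-- scale_notes_ext[i] ∈ mod_scale_type fires but scale_notes[i] or scale_notes[(i+j)%12] is out of range.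
def Pre_create_chord (scale_notes : List String) (scale_notes_ext : List String) (mod_scale_type : List String) (chord_type : List Int) : Prop :=
  ∀ i, i < scale_notes_ext.length → scale_notes_ext.getD i "" ∈ mod_scale_type →
    i < scale_notes.length ∧ ∀ j ∈ chord_type, ((i : Int) + j).emod 12 < (scale_notes.length : Int)
instance (scale_notes : List String) (scale_notes_ext : List String) (mod_scale_type : List String) (chord_type : List Int) : Decidable (Pre_create_chord scale_notes scale_notes_ext mod_scale_type chord_type) := by unfold Pre_create_chord; infer_instance

def pvWitness_create_chord : List String × List String × List String × List Int :=
  (["C", "C#", "D", "Eb", "E", "F", "F#", "G", "Ab", "A", "Bb", "B"],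
   ["C", "D", "E"], ["C", "D", "E", "G"], [2, 4])

def Spec_create_chord (scale_notes : List String) (scale_notes_ext : List String) (mod_scale_type : List String) (chord_type : List Int) (out : Option (List (List String))) : Prop := out = create_chord_alt scale_notes scale_notes_ext mod_scale_type chord_type
instance (scale_notes : List String) (scale_notes_ext : List String) (mod_scale_type : List String) (chord_type : List Int) (out : Option (List (List String))) : Decidable (Spec_create_chord scale_notes scale_notes_ext mod_scale_type chord_type out) := by unfold Spec_create_chord; infer_instance

-- ===== CLAIM (what is proved, stated in full; the proofs are below) =====
def Claim_equal_create_chord : Prop := ∀ (scale_notes : List String) (scale_notes_ext : List String) (mod_scale_type : List String) (chord_type : List Int), Dom_create_chord scale_notes scale_notes_ext mod_scale_type chord_type → Pre_create_chord scale_notes scale_notes_ext mod_scale_type chord_type → Spec_create_chord scale_notes scale_notes_ext mod_scale_type chord_type (create_chord scale_notes scale_notes_ext mod_scale_type chord_type)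

-- ===== LEMMAS AND PROOFS =====

-- B's loop shape: guard on the index, build, then filter the built element inline.
theorem foldl_guard_filter {α β : Type} (g : α → Bool) (f : α → β) (p : β → Bool) :
    ∀ (l : List α) (acc : List β),
      l.foldl (fun acc x => if !(g x) then acc else if p (f x) then acc ++ [f x] else acc) acc
        = acc ++ ((l.filter g).map f).filter p := by
  intro l
  induction l with
  | nil => simp
  | cons x l ih =>
    intro acc
    by_cases hg : g x = true
    · by_cases hp : p (f x) = true
      · simp only [List.foldl_cons, hg, Bool.not_true, Bool.false_eq_true, if_false, hp, if_true]
        rw [ih]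
        simp [hg, hp]
      · simp only [List.foldl_cons, hg, Bool.not_true, Bool.false_eq_true, if_false, hp]
        rw [ih]
        simp [hg, hp]
    · simp only [List.foldl_cons, hg, Bool.not_false, if_true]
      rw [ih]
      simp [hg]

-- Removing values that a good head can never equal commutes with consing the head.
theorem removeFold_cons {α : Type} [BEq α] [LawfulBEq α] :
    ∀ (l : List α) (cs : List α) (c : α), (∀ x ∈ l, x ≠ c) →
      l.foldl (fun cs v => (PySem.List.remove? cs v).getD cs) (c :: cs)
        = c :: l.foldl (fun cs v => (PySem.List.remove? cs v).getD cs) cs := by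
  intro l
  induction l with
  | nil => intro cs c _; rfl
  | cons v l ih =>
    intro cs c h
    have hne : c ≠ v := fun e => (h v (by simp)) e.symm
    have : (PySem.List.remove? (c :: cs) v).getD (c :: cs)
        = c :: (PySem.List.remove? cs v).getD cs := by
      rw [PySem.List.remove?_cons_of_ne cs hne]
      cases PySem.List.remove? cs v <;> rfl
    simp only [List.foldl_cons, this]
    exact ih _ c (fun x hx => h x (by simp [hx]))

-- A's removal phase: deleting (by value) each element of cs.filter p from cs leaves cs.filter (!p).
theorem removeFold_filter {α : Type} [BEq α] [LawfulBEq α] (p : α → Bool) :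
    ∀ (cs : List α),
      (cs.filter p).foldl (fun cs v => (PySem.List.remove? cs v).getD cs) cs
        = cs.filter (fun x => !p x) := by
  intro cs
  induction cs with
  | nil => rfl
  | cons c cs ih =>
    by_cases hp : p c = true
    · simp only [List.filter_cons, hp, if_pos, List.foldl_cons,
        PySem.List.remove?_cons_self, Option.getD_some]
      simp [ih]
    · have hfil : (c :: cs).filter p = cs.filter p := by simp [hp]
      have hmem : ∀ x ∈ cs.filter p, x ≠ c := by
        intro x hx he
        rw [List.mem_filter] at hx
        exact hp (he ▸ hx.2)
      rw [hfil, removeFold_cons _ _ _ hmem, ih]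
      simp [hp]

-- ===== VERDICT (by name: the statement is the Claim_ definition above) =====
theorem create_chord_spec : Claim_equal_create_chord := by
  intro sn ext mod ct _ _
  unfold Spec_create_chord create_chord create_chord_alt
  -- A phase 1: chord building foldl is cons + map, then the guarded append is filter-map
  simp only [PySem.List.foldl_append_singleton_eq_map, List.singleton_append,
    PySem.List.foldl_append_if, List.nil_append]
  -- A phase 3: removal of the marked chords is a filter
  simp only [List.map_id_fun', id]
  rw [removeFold_filter]
  -- B: one-pass fold with inline filter
  rw [foldl_guard_filter (fun i => mod.contains (PySem.List.pyGetD ext (i : Int) ""))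
    (fun i => PySem.List.pyGetD sn (i : Int) "" ::
      ct.map (fun j => PySem.List.pyGetD sn (PySem.Int.mod ((i : Int) + j) 12) ""))
    (fun c => c.all (fun n => mod.contains n))]
  simp only [List.all_eq_not_any_not, List.nil_append]
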